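-- pv_equiv track=rewrite | github.com/saketbhatnagar1/DSA | Questions/Subsets.py | areDisjoint
-- ===== SOURCE A (Python) =====
-- def areDisjoint(a, b):
--     freq = {}
--     for i in a:
--         freq[i] = freq.get(i,0)+1
--     for i in b:
--         if i in freq:
--             return False
--     return True
-- ===== SOURCE B (Python) =====
-- def areDisjoint(a, b):
--     sa, sb = sorted(a), sorted(b)
--     i = j = 0
--     while i < len(sa) and j < len(sb):
--         if sa[i] == sb[j]:
--             return False
--         if sa[i] < sb[j]:
--             i += 1
--         else:
--             j += 1
--     return True
-- ===== Notes on version B (the rewrite author's own statement) =====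
-- stated objective: alternative
-- what changed: Replaces the frequency-dict build plus hashed membership scan with a comparison-based algorithm: sort both lists and run a two-pointer merge scan that detects any common element.
import Mathlib
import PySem

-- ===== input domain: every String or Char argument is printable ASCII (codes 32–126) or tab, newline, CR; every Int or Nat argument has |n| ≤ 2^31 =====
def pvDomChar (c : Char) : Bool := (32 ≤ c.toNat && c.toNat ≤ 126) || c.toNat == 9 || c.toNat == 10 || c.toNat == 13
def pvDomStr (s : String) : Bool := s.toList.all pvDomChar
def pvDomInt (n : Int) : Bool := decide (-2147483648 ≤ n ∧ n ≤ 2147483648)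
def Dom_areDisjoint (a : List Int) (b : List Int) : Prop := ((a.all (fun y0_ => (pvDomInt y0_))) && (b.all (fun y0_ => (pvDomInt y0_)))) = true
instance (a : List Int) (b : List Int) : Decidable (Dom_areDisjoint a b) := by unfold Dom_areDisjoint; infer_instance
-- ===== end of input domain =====

-- B replaces A's frequency-dict build + hashed membership scan by sorting both lists
-- and running a two-pointer merge scan (comparison-based alternative; no hashing).

-- ===== PORT A =====
-- 'for i in b: if i in freq: return False' / 'return True'
def areDisjointScan (freq : PySem.Dict Int Int) : List Int → Bool
  | [] => true
  | i :: rest => if freq.contains i then false else areDisjointScan freq rest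

def areDisjoint (a : List Int) (b : List Int) : Bool :=
  -- freq = {}; for i in a: freq[i] = freq.get(i,0)+1
  let freq := a.foldl (fun d i => d.insert i (d.getD i 0 + 1)) (PySem.Dict.empty : PySem.Dict Int Int)
  areDisjointScan freq b

-- ===== PORT B =====
-- the 'while i < len(sa) and j < len(sb)' two-pointer loop, as structural recursion
-- on the unconsumed suffixes of the two sorted lists
def djMerge : List Int → List Int → Bool
  | [], _ => true
  | _ :: _, [] => true
  | x :: xs, y :: ys =>
    if x = y then false
    else if x < y then djMerge xs (y :: ys)
    else djMerge (x :: xs) ys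
  termination_by xs ys => xs.length + ys.length

-- sa, sb = sorted(a), sorted(b); then the two-pointer scan
def areDisjoint_alt (a : List Int) (b : List Int) : Bool :=
  djMerge (PySem.List.sorted a (fun x => x) false) (PySem.List.sorted b (fun x => x) false)

-- ===== PRECONDITION & SPEC =====
def Spec_areDisjoint (a : List Int) (b : List Int) (out : Bool) : Prop := out = areDisjoint_alt a b
instance (a : List Int) (b : List Int) (out : Bool) : Decidable (Spec_areDisjoint a b out) := by unfold Spec_areDisjoint; infer_instance

-- ===== CLAIM (what is proved, stated in full; the proofs are below) =====
def Claim_equal_areDisjoint : Prop := ∀ (a : List Int) (b : List Int), Dom_areDisjoint a b → Spec_areDisjoint a b (areDisjoint a b)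

-- ===== LEMMAS AND PROOFS =====

lemma areDisjointScan_eq_all (freq : PySem.Dict Int Int) (b : List Int) :
    areDisjointScan freq b = b.all (fun i => !freq.contains i) := by
  induction b with
  | nil => rfl
  | cons i rest ih =>
    simp only [areDisjointScan, List.all_cons, ih]
    by_cases h : freq.contains i = true <;> simp [h]

lemma areDisjoint_true_iff (a b : List Int) :
    areDisjoint a b = true ↔ ∀ x ∈ b, x ∉ a := by
  unfold areDisjoint
  rw [areDisjointScan_eq_all, List.all_eq_true]
  have hkeys : (a.foldl (fun d i => d.insert i (d.getD i 0 + 1)) (PySem.Dict.empty : PySem.Dict Int Int)).keys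
      = PySem.Set.ofList a := by
    rw [PySem.Dict.keys_foldl_insert, PySem.Dict.keys_empty]
    rfl
  constructor
  · intro h x hx hxa
    have := h x hx
    rw [Bool.not_eq_eq_eq_not, Bool.not_true, ← Bool.not_eq_true,
        PySem.Dict.contains_iff_mem_keys] at this
    rw [hkeys, PySem.Set.mem_ofList] at this
    exact this hxa
  · intro h x hx
    have : ¬ x ∈ (a.foldl (fun d i => d.insert i (d.getD i 0 + 1)) (PySem.Dict.empty : PySem.Dict Int Int)).keys := by
      rw [hkeys, PySem.Set.mem_ofList]; exact h x hx
    rw [← PySem.Dict.contains_iff_mem_keys, Bool.not_eq_true] at this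
    simp only [Bool.not_eq_eq_eq_not, Bool.not_true]
    exact this

-- on sorted inputs the merge scan decides disjointness
lemma djMerge_true_iff (xs ys : List Int)
    (hx : xs.Pairwise (· ≤ ·)) (hy : ys.Pairwise (· ≤ ·)) :
    djMerge xs ys = true ↔ ∀ x ∈ xs, x ∉ ys := by
  induction xs generalizing ys with
  | nil => simp [djMerge]
  | cons x xs ihx =>
    induction ys with
    | nil => simp [djMerge]
    | cons y ys ihy =>
      rcases List.pairwise_cons.mp hx with ⟨hxle, hx'⟩
      rcases List.pairwise_cons.mp hy with ⟨hyle, hy'⟩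
      by_cases hxy : x = y
      · subst hxy
        simp [djMerge]
      · by_cases hlt : x < y
        · rw [show djMerge (x :: xs) (y :: ys) = djMerge xs (y :: ys) by
            simp [djMerge, hxy, hlt]]
          rw [ihx (y :: ys) hx' hy]
          constructor
          · intro h z hz
            rcases List.mem_cons.mp hz with rfl | hz'
            · intro hmem
              rcases List.mem_cons.mp hmem with h1 | h2
              · exact hxy h1
              · exact absurd (hyle z h2) (by omega)
            · exact h z hz'
          · intro h z hz; exact h z (List.mem_cons_of_mem _ hz)
        · have hgt : y < x := lt_of_le_of_ne (not_lt.mp hlt) (Ne.symm hxy)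
          rw [show djMerge (x :: xs) (y :: ys) = djMerge (x :: xs) ys by
            simp [djMerge, hxy, hlt]]
          rw [ihy hy']
          constructor
          · intro h z hz hmem
            rcases List.mem_cons.mp hmem with rfl | hz'
            · rcases List.mem_cons.mp hz with rfl | hz2
              · exact hxy rfl
              · exact absurd (hxle z hz2) (by omega)
            · exact h z hz hz'
          · intro h z hz hz'; exact h z hz (List.mem_cons_of_mem _ hz')

lemma areDisjoint_alt_true_iff (a b : List Int) :
    areDisjoint_alt a b = true ↔ ∀ x ∈ b, x ∉ a := by
  unfold areDisjoint_alt
  rw [djMerge_true_iff _ _ (PySem.List.sorted_pairwise a (fun x => x) ) (PySem.List.sorted_pairwise b (fun x => x))]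
  constructor
  · intro h x hxb hxa
    exact h x ((PySem.List.mem_sorted _ _ _ _).mpr hxa) ((PySem.List.mem_sorted _ _ _ _).mpr hxb)
  · intro h x hxa hxb
    exact h x ((PySem.List.mem_sorted _ _ _ _).mp hxb) ((PySem.List.mem_sorted _ _ _ _).mp hxa)

-- ===== VERDICT (by name: the statement is the Claim_ definition above) =====
theorem areDisjoint_spec : Claim_equal_areDisjoint := by
  intro a b _
  unfold Spec_areDisjoint
  rw [Bool.eq_iff_iff, areDisjoint_true_iff, areDisjoint_alt_true_iff]
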